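-- pv_equiv track=rewrite | github.com/Pray2U/Pair2goring-ashhun | PairProgramming 11.30/programers.py | solution
-- ===== SOURCE A (Python) =====
-- import itertools
--
-- def solution(babbling):
--     answer = 0
--     a = ["aya", "ye", "woo", "ma"]
--     c = []
--     bb = []
--
--     for i in range(1, 5):
--         bb = itertools.permutations(a, i)
--         bb = list(map("".join, bb))
--         c += bb
--
--     for j in babbling:
--         if j in c:
--             answer += 1
--     return answer
-- ===== SOURCE B (Python) =====
-- SOUNDS = ["aya", "ye", "woo", "ma"]
--
-- def can_babble(word):
--     used = set()
--     rest = word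
--     while rest:
--         for s in SOUNDS:
--             if rest.startswith(s):
--                 if s in used:
--                     return False
--                 used.add(s)
--                 rest = rest[len(s):]
--                 break
--         else:
--             return False
--     return bool(word)
--
-- def solution(babbling):
--     return sum(1 for w in babbling if can_babble(w))
-- ===== Notes on version B (the rewrite author's own statement) =====
-- stated objective: simpler
-- what changed: B drops A's precomputed table of all 64 permutation concatenations (itertools.permutations + list membership scan) and instead greedily parses each word once, stripping whichever of the four sounds prefixes the rest and failing on sound reuse or an unmatchable remainder.
import Mathlib
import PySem

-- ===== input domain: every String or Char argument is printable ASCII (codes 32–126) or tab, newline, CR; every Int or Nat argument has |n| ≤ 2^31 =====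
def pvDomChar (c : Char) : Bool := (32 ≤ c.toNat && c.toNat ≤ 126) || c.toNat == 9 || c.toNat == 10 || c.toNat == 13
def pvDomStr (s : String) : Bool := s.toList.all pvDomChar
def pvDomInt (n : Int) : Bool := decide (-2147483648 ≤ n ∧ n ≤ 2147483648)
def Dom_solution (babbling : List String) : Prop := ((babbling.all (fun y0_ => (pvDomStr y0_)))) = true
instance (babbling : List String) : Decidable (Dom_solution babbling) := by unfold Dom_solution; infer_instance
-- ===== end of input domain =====

-- B replaces A's precomputed table of all 64 permutation concatenations by a single
-- greedy parsing pass per word (simpler: no table, one parsing pass per word).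

-- ===== PORT A =====
-- itertools.permutations(l, k) for a list of distinct elements, in itertools order
def permsK (l : List String) (k : Nat) : List (List String) :=
  match k with
  | 0 => [[]]
  | Nat.succ k' => l.flatMap (fun x => (permsK (l.erase x) k').map (fun p => x :: p))

def aListA : List String := ["aya", "ye", "woo", "ma"]

-- c after the first loop: for i in range(1,5): c += map("".join, permutations(a, i))
def cListA : List String :=
  (List.range' 1 4).foldl (fun c i => c ++ (permsK aListA i).map String.join) []

def solution (babbling : List String) : Int :=
  babbling.foldl (fun answer j => if j ∈ cListA then answer + 1 else answer) 0

-- ===== PORT B =====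
def soundsB : List String := ["aya", "ye", "woo", "ma"]

-- the while loop of can_babble: strip one matching unused sound per step
def canBabbleAux (rest : List Char) (used : List String) : Bool :=
  if hr : rest = [] then true
  else
    match h : soundsB.find? (fun s => s.toList.isPrefixOf rest) with
    | none => false
    | some s =>
      if s ∈ used then false
      else canBabbleAux (rest.drop s.toList.length) (s :: used)
termination_by rest.length
decreasing_by
  have hmem := List.mem_of_find?_eq_some h
  have hp := List.find?_some h
  have h1 : 1 ≤ s.toList.length := by
    simp [soundsB] at hmem
    rcases hmem with h' | h' | h' | h' <;> subst h' <;> decide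
  have h2 : 0 < rest.length := List.length_pos_of_ne_nil hr
  rw [List.length_drop]
  omega

def canBabble (word : String) : Bool :=
  if canBabbleAux word.toList [] then word != "" else false

def solution_alt (babbling : List String) : Int :=
  ((babbling.countP canBabble : Nat) : Int)

-- ===== PRECONDITION & SPEC =====
def Spec_solution (babbling : List String) (out : Int) : Prop := out = solution_alt babbling
instance (babbling : List String) (out : Int) : Decidable (Spec_solution babbling out) := by unfold Spec_solution; infer_instance

-- ===== CLAIM (what is proved, stated in full; the proofs are below) =====
def Claim_equal_solution : Prop := ∀ (babbling : List String), Dom_solution babbling → Spec_solution babbling (solution babbling)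

-- ===== LEMMAS AND PROOFS =====

-- all char-lists parsable from a given set of still-available sounds (flags a=aya, y=ye, w=woo, m=ma)
def F (a y w m : Bool) : List (List Char) :=
  [] :: ((if a then (F false y w m).map (fun t => 'a'::'y'::'a'::t) else []) ++
         (if y then (F a false w m).map (fun t => 'y'::'e'::t) else []) ++
         (if w then (F a y false m).map (fun t => 'w'::'o'::'o'::t) else []) ++
         (if m then (F a y w false).map (fun t => 'm'::'a'::t) else []))
termination_by (cond a 1 0) + (cond y 1 0) + (cond w 1 0) + (cond m 1 0)
decreasing_by all_goals simp_all

theorem mem_F (a y w m : Bool) (cs : List Char) :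
    cs ∈ F a y w m ↔ cs = [] ∨
      (a = true ∧ ∃ t, t ∈ F false y w m ∧ cs = 'a'::'y'::'a'::t) ∨
      (y = true ∧ ∃ t, t ∈ F a false w m ∧ cs = 'y'::'e'::t) ∨
      (w = true ∧ ∃ t, t ∈ F a y false m ∧ cs = 'w'::'o'::'o'::t) ∨
      (m = true ∧ ∃ t, t ∈ F a y w false ∧ cs = 'm'::'a'::t) := by
  conv_lhs => rw [F]
  simp [List.mem_append, List.mem_map, eq_comm]

theorem aux_iff (n : Nat) : ∀ (rest : List Char) (used : List String), rest.length ≤ n →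
    (canBabbleAux rest used = true ↔
      rest ∈ F (decide ("aya" ∉ used)) (decide ("ye" ∉ used))
               (decide ("woo" ∉ used)) (decide ("ma" ∉ used))) := by
  induction n with
  | zero =>
    intro rest used hn
    have : rest = [] := List.eq_nil_of_length_eq_zero (Nat.le_zero.mp hn)
    subst this
    rw [canBabbleAux]; rw [mem_F]; simp
  | succ n ih =>
    intro rest used hn
    by_cases hr : rest = []
    · subst hr; rw [canBabbleAux]; rw [mem_F]; simp
    · rw [canBabbleAux, dif_neg hr]
      by_cases hA : "aya".toList.isPrefixOf rest = true
      · have hAL : "aya".toList = ['a','y','a'] := by decide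
        obtain ⟨t, rfl⟩ : ∃ t, rest = ['a','y','a'] ++ t := by
          obtain ⟨t, ht⟩ := List.isPrefixOf_iff_prefix.mp hA
          exact ⟨t, by rw [← ht, hAL]⟩
        have hfind : soundsB.find? (fun s => s.toList.isPrefixOf (['a','y','a'] ++ t)) = some "aya" := by
          simp [soundsB]
        have hdrop : (['a','y','a'] ++ t).drop ("aya".toList.length) = t := by
          rw [show "aya".toList.length = 3 from by decide]; simp
        split
        next hnone => rw [hfind] at hnone; cases hnone
        next s hsome =>
          obtain rfl : s = "aya" := by rw [hfind] at hsome; exact (Option.some.inj hsome).symm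
          by_cases hu : "aya" ∈ used
          · rw [if_pos hu]
            conv_rhs => rw [mem_F]
            simp [hu]
          · rw [if_neg hu, hdrop]
            have ht : t.length ≤ n := by simp at hn; omega
            rw [ih t ("aya" :: used) ht]
            conv_rhs => rw [mem_F]
            simp [hu]
      by_cases hYX : "ye".toList.isPrefixOf rest = true
      · have hyeL : "ye".toList = ['y','e'] := by decide
        obtain ⟨t, rfl⟩ : ∃ t, rest = ['y','e'] ++ t := by
          obtain ⟨t, ht⟩ := List.isPrefixOf_iff_prefix.mp hYX
          exact ⟨t, by rw [← ht, hyeL]⟩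
        have hfind : soundsB.find? (fun s => s.toList.isPrefixOf (['y','e'] ++ t)) = some "ye" := by
          simp [soundsB, List.find?, List.isPrefixOf]
        have hdrop : (['y','e'] ++ t).drop ("ye".toList.length) = t := by
          rw [show "ye".toList.length = 2 from by decide]; simp
        split
        next hnone => rw [hfind] at hnone; cases hnone
        next s hsome =>
          obtain rfl : s = "ye" := by rw [hfind] at hsome; exact (Option.some.inj hsome).symm
          by_cases hu : "ye" ∈ used
          · rw [if_pos hu]
            conv_rhs => rw [mem_F]
            simp [hu]
          · rw [if_neg hu, hdrop]
            have ht : t.length ≤ n := by simp at hn; omega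
            rw [ih t ("ye" :: used) ht]
            conv_rhs => rw [mem_F]
            simp [hu]
      by_cases hWX : "woo".toList.isPrefixOf rest = true
      · have hwooL : "woo".toList = ['w','o','o'] := by decide
        obtain ⟨t, rfl⟩ : ∃ t, rest = ['w','o','o'] ++ t := by
          obtain ⟨t, ht⟩ := List.isPrefixOf_iff_prefix.mp hWX
          exact ⟨t, by rw [← ht, hwooL]⟩
        have hfind : soundsB.find? (fun s => s.toList.isPrefixOf (['w','o','o'] ++ t)) = some "woo" := by
          simp [soundsB, List.find?, List.isPrefixOf]
        have hdrop : (['w','o','o'] ++ t).drop ("woo".toList.length) = t := by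
          rw [show "woo".toList.length = 3 from by decide]; simp
        split
        next hnone => rw [hfind] at hnone; cases hnone
        next s hsome =>
          obtain rfl : s = "woo" := by rw [hfind] at hsome; exact (Option.some.inj hsome).symm
          by_cases hu : "woo" ∈ used
          · rw [if_pos hu]
            conv_rhs => rw [mem_F]
            simp [hu]
          · rw [if_neg hu, hdrop]
            have ht : t.length ≤ n := by simp at hn; omega
            rw [ih t ("woo" :: used) ht]
            conv_rhs => rw [mem_F]
            simp [hu]
      by_cases hMX : "ma".toList.isPrefixOf rest = true
      · have hmaL : "ma".toList = ['m','a'] := by decide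
        obtain ⟨t, rfl⟩ : ∃ t, rest = ['m','a'] ++ t := by
          obtain ⟨t, ht⟩ := List.isPrefixOf_iff_prefix.mp hMX
          exact ⟨t, by rw [← ht, hmaL]⟩
        have hfind : soundsB.find? (fun s => s.toList.isPrefixOf (['m','a'] ++ t)) = some "ma" := by
          simp [soundsB, List.find?, List.isPrefixOf]
        have hdrop : (['m','a'] ++ t).drop ("ma".toList.length) = t := by
          rw [show "ma".toList.length = 2 from by decide]; simp
        split
        next hnone => rw [hfind] at hnone; cases hnone
        next s hsome =>
          obtain rfl : s = "ma" := by rw [hfind] at hsome; exact (Option.some.inj hsome).symm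
          by_cases hu : "ma" ∈ used
          · rw [if_pos hu]
            conv_rhs => rw [mem_F]
            simp [hu]
          · rw [if_neg hu, hdrop]
            have ht : t.length ≤ n := by simp at hn; omega
            rw [ih t ("ma" :: used) ht]
            conv_rhs => rw [mem_F]
            simp [hu]
      -- no sound matches: find? = none
      have hfind : soundsB.find? (fun s => s.toList.isPrefixOf rest) = none := by
        have hA' := hA; have hY' := hYX; have hW' := hWX; have hM' := hMX
        rw [show "aya".toList = ['a','y','a'] from by decide] at hA'
        rw [show "ye".toList = ['y','e'] from by decide] at hY'
        rw [show "woo".toList = ['w','o','o'] from by decide] at hW'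
        rw [show "ma".toList = ['m','a'] from by decide] at hM'
        simp [soundsB, List.find?, hA', hY', hW', hM']
      split
      next hnone =>
        simp only [Bool.false_eq_true, false_iff]
        rw [mem_F]
        rintro (rfl | ⟨-, t, -, rfl⟩ | ⟨-, t, -, rfl⟩ | ⟨-, t, -, rfl⟩ | ⟨-, t, -, rfl⟩)
        · exact hr rfl
        · exact hA (by rw [List.isPrefixOf_iff_prefix, show ("aya".toList)=['a','y','a'] from by decide]; exact ⟨t, rfl⟩)
        · exact hYX (by rw [List.isPrefixOf_iff_prefix, show ("ye".toList)=['y','e'] from by decide]; exact ⟨t, rfl⟩)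
        · exact hWX (by rw [List.isPrefixOf_iff_prefix, show ("woo".toList)=['w','o','o'] from by decide]; exact ⟨t, rfl⟩)
        · exact hMX (by rw [List.isPrefixOf_iff_prefix, show ("ma".toList)=['m','a'] from by decide]; exact ⟨t, rfl⟩)
      next s hsome => rw [hfind] at hsome; cases hsome

def FLit : List (List Char) :=
  [[],
   ['a', 'y', 'a'],
   ['a', 'y', 'a', 'y', 'e'],
   ['a', 'y', 'a', 'y', 'e', 'w', 'o', 'o'],
   ['a', 'y', 'a', 'y', 'e', 'w', 'o', 'o', 'm', 'a'],
   ['a', 'y', 'a', 'y', 'e', 'm', 'a'],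
   ['a', 'y', 'a', 'y', 'e', 'm', 'a', 'w', 'o', 'o'],
   ['a', 'y', 'a', 'w', 'o', 'o'],
   ['a', 'y', 'a', 'w', 'o', 'o', 'y', 'e'],
   ['a', 'y', 'a', 'w', 'o', 'o', 'y', 'e', 'm', 'a'],
   ['a', 'y', 'a', 'w', 'o', 'o', 'm', 'a'],
   ['a', 'y', 'a', 'w', 'o', 'o', 'm', 'a', 'y', 'e'],
   ['a', 'y', 'a', 'm', 'a'],
   ['a', 'y', 'a', 'm', 'a', 'y', 'e'],
   ['a', 'y', 'a', 'm', 'a', 'y', 'e', 'w', 'o', 'o'],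
   ['a', 'y', 'a', 'm', 'a', 'w', 'o', 'o'],
   ['a', 'y', 'a', 'm', 'a', 'w', 'o', 'o', 'y', 'e'],
   ['y', 'e'],
   ['y', 'e', 'a', 'y', 'a'],
   ['y', 'e', 'a', 'y', 'a', 'w', 'o', 'o'],
   ['y', 'e', 'a', 'y', 'a', 'w', 'o', 'o', 'm', 'a'],
   ['y', 'e', 'a', 'y', 'a', 'm', 'a'],
   ['y', 'e', 'a', 'y', 'a', 'm', 'a', 'w', 'o', 'o'],
   ['y', 'e', 'w', 'o', 'o'],
   ['y', 'e', 'w', 'o', 'o', 'a', 'y', 'a'],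
   ['y', 'e', 'w', 'o', 'o', 'a', 'y', 'a', 'm', 'a'],
   ['y', 'e', 'w', 'o', 'o', 'm', 'a'],
   ['y', 'e', 'w', 'o', 'o', 'm', 'a', 'a', 'y', 'a'],
   ['y', 'e', 'm', 'a'],
   ['y', 'e', 'm', 'a', 'a', 'y', 'a'],
   ['y', 'e', 'm', 'a', 'a', 'y', 'a', 'w', 'o', 'o'],
   ['y', 'e', 'm', 'a', 'w', 'o', 'o'],
   ['y', 'e', 'm', 'a', 'w', 'o', 'o', 'a', 'y', 'a'],
   ['w', 'o', 'o'],
   ['w', 'o', 'o', 'a', 'y', 'a'],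
   ['w', 'o', 'o', 'a', 'y', 'a', 'y', 'e'],
   ['w', 'o', 'o', 'a', 'y', 'a', 'y', 'e', 'm', 'a'],
   ['w', 'o', 'o', 'a', 'y', 'a', 'm', 'a'],
   ['w', 'o', 'o', 'a', 'y', 'a', 'm', 'a', 'y', 'e'],
   ['w', 'o', 'o', 'y', 'e'],
   ['w', 'o', 'o', 'y', 'e', 'a', 'y', 'a'],
   ['w', 'o', 'o', 'y', 'e', 'a', 'y', 'a', 'm', 'a'],
   ['w', 'o', 'o', 'y', 'e', 'm', 'a'],
   ['w', 'o', 'o', 'y', 'e', 'm', 'a', 'a', 'y', 'a'],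
   ['w', 'o', 'o', 'm', 'a'],
   ['w', 'o', 'o', 'm', 'a', 'a', 'y', 'a'],
   ['w', 'o', 'o', 'm', 'a', 'a', 'y', 'a', 'y', 'e'],
   ['w', 'o', 'o', 'm', 'a', 'y', 'e'],
   ['w', 'o', 'o', 'm', 'a', 'y', 'e', 'a', 'y', 'a'],
   ['m', 'a'],
   ['m', 'a', 'a', 'y', 'a'],
   ['m', 'a', 'a', 'y', 'a', 'y', 'e'],
   ['m', 'a', 'a', 'y', 'a', 'y', 'e', 'w', 'o', 'o'],
   ['m', 'a', 'a', 'y', 'a', 'w', 'o', 'o'],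
   ['m', 'a', 'a', 'y', 'a', 'w', 'o', 'o', 'y', 'e'],
   ['m', 'a', 'y', 'e'],
   ['m', 'a', 'y', 'e', 'a', 'y', 'a'],
   ['m', 'a', 'y', 'e', 'a', 'y', 'a', 'w', 'o', 'o'],
   ['m', 'a', 'y', 'e', 'w', 'o', 'o'],
   ['m', 'a', 'y', 'e', 'w', 'o', 'o', 'a', 'y', 'a'],
   ['m', 'a', 'w', 'o', 'o'],
   ['m', 'a', 'w', 'o', 'o', 'a', 'y', 'a'],
   ['m', 'a', 'w', 'o', 'o', 'a', 'y', 'a', 'y', 'e'],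
   ['m', 'a', 'w', 'o', 'o', 'y', 'e'],
   ['m', 'a', 'w', 'o', 'o', 'y', 'e', 'a', 'y', 'a']]

def cLit : List String :=
  ["aya", "ye", "woo", "ma", "ayaye", "ayawoo", "ayama", "yeaya", "yewoo", "yema", "wooaya", "wooye", "wooma", "maaya", "maye", "mawoo", "ayayewoo", "ayayema", "ayawooye", "ayawooma", "ayamaye", "ayamawoo", "yeayawoo", "yeayama", "yewooaya", "yewooma", "yemaaya", "yemawoo", "wooayaye", "wooayama", "wooyeaya", "wooyema", "woomaaya", "woomaye", "maayaye", "maayawoo", "mayeaya", "mayewoo", "mawooaya", "mawooye", "ayayewooma", "ayayemawoo", "ayawooyema", "ayawoomaye", "ayamayewoo", "ayamawooye", "yeayawooma", "yeayamawoo", "yewooayama", "yewoomaaya", "yemaayawoo", "yemawooaya", "wooayayema", "wooayamaye", "wooyeayama", "wooyemaaya", "woomaayaye", "woomayeaya", "maayayewoo", "maayawooye", "mayeayawoo", "mayewooaya", "mawooayaye", "mawooyeaya"]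

theorem F_eval : F true true true true = FLit := by
  simp [F, FLit]

theorem c_eval : cListA = cLit := by decide

theorem canBabble_iff_mem (j : String) : canBabble j = true ↔ j ∈ cListA := by
  have hmem := aux_iff j.toList.length j.toList [] le_rfl
  simp only [List.not_mem_nil, not_false_iff, decide_true] at hmem
  rw [F_eval] at hmem
  rw [c_eval]
  unfold canBabble
  by_cases hx : canBabbleAux j.toList [] = true
  · rw [if_pos hx]
    have hj : j.toList ∈ FLit := hmem.mp hx
    constructor
    · intro hne
      have hmm : j.toList ∈ cLit.map String.toList := by
        have hsub : ∀ x ∈ FLit, x ≠ [] → x ∈ cLit.map String.toList := by decide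
        refine hsub _ hj (fun h0 => ?_)
        have : j = "" := String.toList_inj.mp (by rw [h0]; decide)
        subst this; simp at hne
      obtain ⟨s, hs, hse⟩ := List.mem_map.mp hmm
      rwa [← String.toList_inj.mp hse]
    · intro hc
      have h64 : ∀ s ∈ cLit, (s != "") = true := by decide
      exact h64 j hc
  · rw [if_neg hx]
    simp only [Bool.false_eq_true, false_iff]
    intro hc
    apply hx
    apply hmem.mpr
    have h64 : ∀ s ∈ cLit, s.toList ∈ FLit := by decide
    exact h64 j hc

theorem count_eq (babbling : List String) :
    babbling.foldl (fun answer j => if j ∈ cListA then answer + 1 else answer) (0:Int)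
      = ((babbling.countP canBabble : Nat) : Int) := by
  suffices h : ∀ (l : List String) (acc : Int),
      l.foldl (fun answer j => if j ∈ cListA then answer + 1 else answer) acc
        = acc + ((l.countP canBabble : Nat) : Int) by
    simpa using h babbling 0
  intro l
  induction l with
  | nil => simp
  | cons j l ih =>
    intro acc
    rw [List.foldl_cons, List.countP_cons]
    by_cases hj : j ∈ cListA
    · rw [if_pos hj, ih]
      have hb : canBabble j = true := (canBabble_iff_mem j).mpr hj
      simp [hb]
      ring
    · rw [if_neg hj, ih]
      have hb : ¬ canBabble j = true := fun h => hj ((canBabble_iff_mem j).mp h)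
      simp [hb]

-- ===== VERDICT (by name: the statement is the Claim_ definition above) =====
theorem solution_spec : Claim_equal_solution := by
  intro babbling _
  unfold Spec_solution solution solution_alt
  exact count_eq babbling
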